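-- pv_equiv track=rewrite | github.com/MateuszSzelecki/kryptografia-projekt | operations.py | iota
-- ===== SOURCE A (Python) =====
-- def rc(t):
--     #1
--     if t % 255 == 0:
--         return 1
--
--     #2
--     R = [1] + [0] * 7
--
--     #3
--     for i in range(1, t % 255 + 1):
--         R = [0] + R  #a
--         R[0] ^= R[8] #b
--         R[4] ^= R[8] #c
--         R[5] ^= R[8] #d
--         R[6] ^= R[8] #e
--
--         R = R[:8]  #f
--
--     # 4
--     return R[0]
--
-- def iota(A, ir, w):
--     #1
--     A_prime = [[[elem for elem in row] for row in plane] for plane in A]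
--
--     #2
--     RC = [0] * w
--
--     #3
--     for j in range(int(w).bit_length()):
--         RC[2**j - 1] = rc(j + 7 * ir)
--
--     #4
--     for z in range(w):
--         A_prime[0][0][z] ^= RC[z]
--
--     #5
--     return A_prime
-- ===== SOURCE B (Python) =====
-- # One full 255-step period of the Keccak round-constant bit sequence, precomputed:
-- # bit t of this constant is rc(t) for t in 0..254 (the sequence has period 255).
-- _RC_CYCLE = 0xe25c0c93720adacb0fb7ae886c79cc5a452a7767bf4cd460eabe509fe178d01
--
--
-- def rc(t):
--     # table lookup into the precomputed period instead of running the LFSR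
--     return (_RC_CYCLE >> (t % 255)) & 1
--
--
-- def iota(A, ir, w):
--     A_prime = [[[e for e in row] for row in plane] for plane in A]
--     # fused pass: xor each round-constant bit directly into its lane position
--     # (no length-w RC table, no second length-w loop)
--     for j in range(int(w).bit_length()):
--         A_prime[0][0][2 ** j - 1] ^= rc(j + 7 * ir)
--     return A_prime
-- ===== Notes on version B (the rewrite author's own statement) =====
-- stated objective: simpler
-- what changed: B computes each round-constant bit by lookup into one precomputed 255-bit period constant (no LFSR at all) and xors it directly into lane position 2**j-1 in a single loop over w.bit_length(), removing A's zero-initialized length-w RC table and its second length-w apply pass.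
import Mathlib
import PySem

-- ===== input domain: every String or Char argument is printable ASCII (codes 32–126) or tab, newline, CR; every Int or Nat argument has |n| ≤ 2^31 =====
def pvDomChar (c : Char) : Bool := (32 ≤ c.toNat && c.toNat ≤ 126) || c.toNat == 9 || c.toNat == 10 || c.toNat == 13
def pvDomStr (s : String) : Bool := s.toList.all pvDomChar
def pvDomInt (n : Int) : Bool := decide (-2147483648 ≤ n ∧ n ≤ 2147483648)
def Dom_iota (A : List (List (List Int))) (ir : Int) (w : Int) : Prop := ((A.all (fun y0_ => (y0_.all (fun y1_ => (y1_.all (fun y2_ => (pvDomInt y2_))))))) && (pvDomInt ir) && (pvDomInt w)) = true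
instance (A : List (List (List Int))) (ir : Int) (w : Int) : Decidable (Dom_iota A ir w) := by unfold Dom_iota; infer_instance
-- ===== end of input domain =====

-- B replaces A's runtime LFSR by a lookup into one precomputed 255-bit round-constant period
-- and fuses A's RC-table build and length-w apply pass into a single direct xor loop
-- (objective: simpler; return value only — neither version mutates its argument).

-- ===== PORT A =====
-- one iteration of the list-based LFSR loop body in rc (steps a–f)
def rcListStep (R : List Int) : List Int :=
  let R := [0] ++ R
  let R := R.set 0 (PySem.Int.bxor (R.getD 0 0) (R.getD 8 0))
  let R := R.set 4 (PySem.Int.bxor (R.getD 4 0) (R.getD 8 0))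
  let R := R.set 5 (PySem.Int.bxor (R.getD 5 0) (R.getD 8 0))
  let R := R.set 6 (PySem.Int.bxor (R.getD 6 0) (R.getD 8 0))
  R.take 8

def rc (t : Int) : Int :=
  if PySem.Int.mod t 255 = 0 then 1
  else
    let R : List Int := [1] ++ List.replicate 7 0
    let R := (PySem.List.pyRange 1 (PySem.Int.mod t 255 + 1) 1).foldl (fun R _i => rcListStep R) R
    R.getD 0 0

def iota (A : List (List (List Int))) (ir : Int) (w : Int) : List (List (List Int)) :=
  let A_prime := A.map (fun plane => plane.map (fun row => row.map (fun elem => elem)))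
  let RC : List Int := List.replicate w.toNat 0
  let RC := (PySem.List.pyRange 0 (PySem.Int.bitLength w : Int) 1).foldl
      (fun RC j => RC.set (2 ^ j.toNat - 1) (rc (j + 7 * ir))) RC
  (PySem.List.pyRange 0 w 1).foldl
      (fun Ap z => Ap.modify 0 (fun plane => plane.modify 0 (fun row =>
          row.modify z.toNat (fun elem => PySem.Int.bxor elem (RC.getD z.toNat 0))))) A_prime

-- ===== PORT B =====
-- _RC_CYCLE: one full 255-step period of the round-constant bit sequence, precomputed
def rcCycle : Int := 0xe25c0c93720adacb0fb7ae886c79cc5a452a7767bf4cd460eabe509fe178d01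

-- Source B's rc: table lookup into the cycle (t % 255 ≥ 0, so the Python shift is exactly >>> toNat)
def rc_alt (t : Int) : Int :=
  PySem.Int.band (rcCycle >>> (PySem.Int.mod t 255).toNat) 1

def iota_alt (A : List (List (List Int))) (ir : Int) (w : Int) : List (List (List Int)) :=
  let A_prime := A.map (fun plane => plane.map (fun row => row.map (fun e => e)))
  (PySem.List.pyRange 0 (PySem.Int.bitLength w : Int) 1).foldl
      (fun Ap j => Ap.modify 0 (fun plane => plane.modify 0 (fun row =>
          row.modify (2 ^ j.toNat - 1) (fun e => PySem.Int.bxor e (rc_alt (j + 7 * ir)))))) A_prime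

-- ===== PRECONDITION & SPEC =====
-- Pre_ excludes exactly the inputs where Python A raises IndexError: negative w (empty RC
-- table written to), and positive w with A[0][0] missing or shorter than w.
def Pre_iota (A : List (List (List Int))) (ir : Int) (w : Int) : Prop :=
  0 ≤ w ∧ (0 < w → A ≠ [] ∧ A.headD [] ≠ [] ∧ w.toNat ≤ ((A.headD []).headD []).length)
instance (A : List (List (List Int))) (ir : Int) (w : Int) : Decidable (Pre_iota A ir w) := by unfold Pre_iota; infer_instance
def pvWitness_iota : List (List (List Int)) × Int × Int := ([[[0, 7]]], 3, 2)

def Spec_iota (A : List (List (List Int))) (ir : Int) (w : Int) (out : List (List (List Int))) : Prop := out = iota_alt A ir w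
instance (A : List (List (List Int))) (ir : Int) (w : Int) (out : List (List (List Int))) : Decidable (Spec_iota A ir w out) := by unfold Spec_iota; infer_instance

-- ===== CLAIM (what is proved, stated in full; the proofs are below) =====
def Claim_equal_iota : Prop := ∀ (A : List (List (List Int))) (ir : Int) (w : Int), Dom_iota A ir w → Pre_iota A ir w → Spec_iota A ir w (iota A ir w)

-- ===== LEMMAS AND PROOFS =====

-- rc and rc_alt read t only through t % 255
lemma mod255_idem (t : Int) :
    PySem.Int.mod (PySem.Int.mod t 255) 255 = PySem.Int.mod t 255 := by
  have h0 := PySem.Int.mod_nonneg t (b := 255) (by omega)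
  have h1 := PySem.Int.mod_lt t (b := 255) (by omega)
  rw [PySem.Int.mod_eq_emod_of_pos (by omega : (0:Int) < 255)]
  exact Int.emod_eq_of_lt h0 h1

lemma rc_mod (t : Int) : rc (PySem.Int.mod t 255) = rc t := by
  unfold rc; rw [mod255_idem]

lemma rc_alt_mod (t : Int) : rc_alt (PySem.Int.mod t 255) = rc_alt t := by
  unfold rc_alt; rw [mod255_idem]

-- the precomputed cycle agrees with the LFSR on every residue
set_option maxRecDepth 100000 in
lemma rc_table : ∀ m : Fin 255, rc (m : Int) = rc_alt (m : Int) := by decide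

lemma rc_eq (t : Int) : rc t = rc_alt t := by
  have h0 := PySem.Int.mod_nonneg t (b := 255) (by omega)
  have h1 := PySem.Int.mod_lt t (b := 255) (by omega)
  have hfin : ((⟨(PySem.Int.mod t 255).toNat, by omega⟩ : Fin 255) : Int)
      = PySem.Int.mod t 255 := by simp; omega
  have := rc_table ⟨(PySem.Int.mod t 255).toNat, by omega⟩
  rw [hfin] at this
  rw [← rc_mod t, ← rc_alt_mod t, this]

-- the deep copy is the identity
lemma copy_id (A : List (List (List Int))) :
    A.map (fun plane => plane.map (fun row => row.map (fun elem => elem))) = A := by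
  simp

-- a fold that only modifies position [0][0] acts on the first row of the first plane
lemma foldl_modify00 {β : Type} (F : List Int → β → List Int)
    (lane : List Int) (rows : List (List Int)) (planes : List (List (List Int)))
    (js : List β) :
    js.foldl (fun Ap z => List.modify Ap 0 (fun plane => plane.modify 0 (fun row => F row z)))
        ((lane :: rows) :: planes)
      = ((js.foldl F lane) :: rows) :: planes := by
  induction js generalizing lane with
  | nil => rfl
  | cons x xs ih => simp only [List.foldl_cons, List.modify]; exact ih (F lane x)

-- proof-local names for the three lane-level loops
def buildRC (c : Nat → Int) (n k : Nat) : List Int :=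
  (List.range k).foldl (fun R j => R.set (2 ^ j - 1) (c j)) (List.replicate n 0)

def apass (R : List Int) (n : Nat) (lane : List Int) : List Int :=
  (List.range n).foldl (fun l k => l.modify k (fun e => PySem.Int.bxor e (R.getD k 0))) lane

def bpass (c : Nat → Int) (k : Nat) (lane : List Int) : List Int :=
  (List.range k).foldl (fun l j => l.modify (2 ^ j - 1) (fun e => PySem.Int.bxor e (c j))) lane

lemma buildRC_succ (c : Nat → Int) (n k : Nat) :
    buildRC c n (k + 1) = (buildRC c n k).set (2 ^ k - 1) (c k) := by
  unfold buildRC; rw [List.range_succ, List.foldl_append]; rfl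

lemma bpass_succ (c : Nat → Int) (k : Nat) (lane : List Int) :
    bpass c (k + 1) lane = (bpass c k lane).modify (2 ^ k - 1)
      (fun e => PySem.Int.bxor e (c k)) := by
  unfold bpass; rw [List.range_succ, List.foldl_append]; rfl

lemma getD_replicate_zero (n i : Nat) : (List.replicate n (0 : Int)).getD i 0 = 0 := by
  rw [List.getD_eq_getElem?_getD, List.getElem?_replicate]
  split <;> rfl

-- A's z-pass, pointwise
lemma apass_getElem (R : List Int) (lane : List Int) (i : Nat) : ∀ n : Nat,
    (apass R n lane)[i]?
      = if i < n then lane[i]?.map (fun e => PySem.Int.bxor e (R.getD i 0)) else lane[i]? := by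
  intro n
  induction n with
  | zero => simp [apass]
  | succ n ih =>
    have hstep : apass R (n + 1) lane = (apass R n lane).modify n
        (fun e => PySem.Int.bxor e (R.getD n 0)) := by
      unfold apass; rw [List.range_succ, List.foldl_append]; rfl
    rw [hstep, List.getElem?_modify, ih]
    by_cases hi : i = n
    · subst hi
      rw [if_neg (by omega), if_pos (by omega)]
      cases lane[i]? <;> simp
    · by_cases hlt : i < n
      · rw [if_pos hlt, if_pos (by omega)]
        cases lane[i]? <;> simp [Ne.symm hi]
      · rw [if_neg hlt, if_neg (by omega)]
        cases lane[i]? <;> simp [Ne.symm hi]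

-- B's direct pass and A's RC table, built in lockstep
lemma bpass_rc (c : Nat → Int) (n : Nat) (lane : List Int) :
    ∀ k : Nat, (∀ j, j < k → 2 ^ j ≤ n) →
    (buildRC c n k).length = n ∧ (∀ i, 2 ^ k - 1 ≤ i → (buildRC c n k).getD i 0 = 0) ∧
    (∀ i, (bpass c k lane)[i]?
        = lane[i]?.map (fun e => PySem.Int.bxor e ((buildRC c n k).getD i 0))) := by
  intro k
  induction k with
  | zero =>
    intro _
    have hb : buildRC c n 0 = List.replicate n 0 := by simp [buildRC]
    refine ⟨by rw [hb]; simp, fun i _ => by rw [hb]; exact getD_replicate_zero n i, fun i => ?_⟩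
    have hbp : bpass c 0 lane = lane := by simp [bpass]
    rw [hbp, hb, getD_replicate_zero n i]
    cases lane[i]? <;> simp
  | succ k ih =>
    intro hk
    obtain ⟨hlen, hzero, hpt⟩ := ih (fun j hj => hk j (by omega))
    have hpow : 2 ^ k ≤ n := hk k (by omega)
    have hone : 1 ≤ 2 ^ k := Nat.one_le_two_pow
    have hi0 : 2 ^ k - 1 < n := by omega
    have hmono : 2 ^ k < 2 ^ (k + 1) := Nat.pow_lt_pow_right (by omega) (by omega)
    rw [buildRC_succ, bpass_succ]
    have hset_self : ((buildRC c n k).set (2 ^ k - 1) (c k)).getD (2 ^ k - 1) 0 = c k := by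
      rw [List.getD_eq_getElem?_getD, List.getElem?_set, if_pos rfl, if_pos (by omega)]
      rfl
    have hset_ne : ∀ i, 2 ^ k - 1 ≠ i →
        ((buildRC c n k).set (2 ^ k - 1) (c k)).getD i 0 = (buildRC c n k).getD i 0 := by
      intro i hne
      rw [List.getD_eq_getElem?_getD, List.getElem?_set, if_neg hne,
          ← List.getD_eq_getElem?_getD]
    refine ⟨by rw [List.length_set]; exact hlen, fun i hi => ?_, fun i => ?_⟩
    · rw [hset_ne i (by omega)]
      exact hzero i (by omega)
    · rw [List.getElem?_modify]
      by_cases hi : 2 ^ k - 1 = i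
      · subst hi
        rw [hpt _, hzero _ (Nat.le_refl _), hset_self]
        cases lane[(2 ^ k - 1)]? <;> simp
      · rw [hpt i, hset_ne i hi]
        cases lane[i]? <;> simp [hi]

-- the lane-level equality: A's table-then-apply equals B's direct pass
lemma lane_eq (ir w : Int) (lane : List Int) (hw : 0 < w) (_hn : w.toNat ≤ lane.length) :
    apass (buildRC (fun j => rc ((j : Int) + 7 * ir)) w.toNat (PySem.Int.bitLength w))
        w.toNat lane
      = bpass (fun j => rc_alt ((j : Int) + 7 * ir)) (PySem.Int.bitLength w) lane := by
  set n := w.toNat with hn_def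
  set bl := PySem.Int.bitLength w with hbl
  have hk : ∀ j, j < bl → 2 ^ j ≤ n := by
    intro j hj
    have h1 : 2 ^ (bl - 1) ≤ w.natAbs := PySem.Int.two_pow_bitLength_le w (by omega)
    have h2 : (2 : Nat) ^ j ≤ 2 ^ (bl - 1) := Nat.pow_le_pow_right (by omega) (by omega)
    omega
  obtain ⟨hlen, _hzero, hpt⟩ :=
    bpass_rc (fun j => rc ((j : Int) + 7 * ir)) n lane bl hk
  have hsame : bpass (fun j => rc_alt ((j : Int) + 7 * ir)) bl lane
      = bpass (fun j => rc ((j : Int) + 7 * ir)) bl lane := by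
    unfold bpass
    apply PySem.List.foldl_congr_mem
    intro acc x _
    simp only [rc_eq]
  rw [hsame]
  apply List.ext_getElem?
  intro i
  rw [apass_getElem, hpt i]
  by_cases hi : i < n
  · rw [if_pos hi]
  · rw [if_neg hi]
    have : (buildRC (fun j => rc ((j : Int) + 7 * ir)) n bl).getD i 0 = 0 := by
      rw [List.getD_eq_getElem?_getD, List.getElem?_eq_none (by rw [hlen]; omega)]
      rfl
    rw [this]
    cases lane[i]? <;> simp

-- rewrite a pyRange-0 fold into a List.range fold (the indices are the casts of 0..n-1)
lemma foldl_pyRange_int {β : Type} (F : β → Int → β) (w : Int) (init : β) :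
    (PySem.List.pyRange 0 w 1).foldl F init
      = (List.range w.toNat).foldl (fun acc (k : Nat) => F acc (k : Int)) init := by
  rw [PySem.List.pyRange_one, List.foldl_map]
  simp only [Int.sub_zero]
  apply PySem.List.foldl_congr_mem
  intro acc x _
  simp

-- ===== VERDICT (by name: the statement is the Claim_ definition above) =====
theorem iota_spec : Claim_equal_iota := by
  intro A ir w _hDom hPre
  obtain ⟨hw0, hshape⟩ := hPre
  unfold Spec_iota iota iota_alt
  simp only [copy_id]
  by_cases hw : 0 < w
  · obtain ⟨hA, hhead, hlen⟩ := hshape hw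
    obtain ⟨plane0, planes, rfl⟩ : ∃ p ps, A = p :: ps := by
      cases A with
      | nil => simp at hA
      | cons p ps => exact ⟨p, ps, rfl⟩
    obtain ⟨lane, rows, rfl⟩ : ∃ l rs, plane0 = l :: rs := by
      cases plane0 with
      | nil => simp at hhead
      | cons l rs => exact ⟨l, rs, rfl⟩
    have hlen' : w.toNat ≤ lane.length := by simpa using hlen
    rw [foldl_modify00, foldl_modify00]
    have hRC : (PySem.List.pyRange 0 (PySem.Int.bitLength w : Int) 1).foldl
        (fun RC j => RC.set (2 ^ j.toNat - 1) (rc (j + 7 * ir))) (List.replicate w.toNat 0)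
        = buildRC (fun j => rc ((j : Int) + 7 * ir)) w.toNat (PySem.Int.bitLength w) := by
      unfold buildRC
      rw [foldl_pyRange_int]
      simp only [Int.toNat_natCast]
    have h1 : (PySem.List.pyRange 0 w 1).foldl
        (fun l (z : Int) => l.modify z.toNat (fun elem => PySem.Int.bxor elem
          (((PySem.List.pyRange 0 (PySem.Int.bitLength w : Int) 1).foldl
            (fun RC j => RC.set (2 ^ j.toNat - 1) (rc (j + 7 * ir)))
            (List.replicate w.toNat 0)).getD z.toNat 0))) lane
        = apass (buildRC (fun j => rc ((j : Int) + 7 * ir)) w.toNat (PySem.Int.bitLength w))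
            w.toNat lane := by
      rw [hRC, foldl_pyRange_int]
      unfold apass
      apply PySem.List.foldl_congr_mem
      intro acc x _
      simp
    have h2 : (PySem.List.pyRange 0 (PySem.Int.bitLength w : Int) 1).foldl
        (fun l (j : Int) => l.modify (2 ^ j.toNat - 1) (fun e => PySem.Int.bxor e
          (rc_alt (j + 7 * ir)))) lane
        = bpass (fun j => rc_alt ((j : Int) + 7 * ir)) (PySem.Int.bitLength w) lane := by
      rw [foldl_pyRange_int]
      simp only [Int.toNat_natCast]
      unfold bpass
      apply PySem.List.foldl_congr_mem
      intro acc x _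
      simp
    rw [h1, h2]
    rw [lane_eq ir w lane hw hlen']
  · have hw0' : w = 0 := by omega
    subst hw0'
    have hbl : PySem.Int.bitLength (0 : Int) = 0 := rfl
    rw [hbl]
    rw [PySem.List.pyRange_one, PySem.List.pyRange_one]
    simp
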